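-- pv_equiv track=rewrite | github.com/mikefeneley/topcoder | src/SRM-682/DNASequence.py | longestDNASequence
-- ===== SOURCE A (Python) =====
-- def longestDNASequence(sequence):
--     longest = 0
--     new = 0
--     for char in sequence:
--         if char == 'A' or char == 'C' or char == 'G' or char == 'T':
--             new += 1
--             longest = max(longest, new)
--         else:
--             new = 0
--     return longest
-- ===== SOURCE B (Python) =====
-- def longestDNASequence(sequence):
--     best = 0
--     i = 0
--     n = len(sequence)
--     while i < n:
--         if sequence[i] in ('A', 'C', 'G', 'T'):
--             j = i + 1
--             while j < n and sequence[j] in ('A', 'C', 'G', 'T'):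
--                 j += 1
--             if j - i > best:
--                 best = j - i
--             i = j
--         else:
--             i += 1
--     return best
-- ===== Notes on version B (the rewrite author's own statement) =====
-- stated objective: alternative
-- what changed: Instead of a running counter with a max update at every character, B splits the string into maximal runs of valid DNA characters (take-while/drop-while two-phase scan) and keeps the longest run length.
import Mathlib
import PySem

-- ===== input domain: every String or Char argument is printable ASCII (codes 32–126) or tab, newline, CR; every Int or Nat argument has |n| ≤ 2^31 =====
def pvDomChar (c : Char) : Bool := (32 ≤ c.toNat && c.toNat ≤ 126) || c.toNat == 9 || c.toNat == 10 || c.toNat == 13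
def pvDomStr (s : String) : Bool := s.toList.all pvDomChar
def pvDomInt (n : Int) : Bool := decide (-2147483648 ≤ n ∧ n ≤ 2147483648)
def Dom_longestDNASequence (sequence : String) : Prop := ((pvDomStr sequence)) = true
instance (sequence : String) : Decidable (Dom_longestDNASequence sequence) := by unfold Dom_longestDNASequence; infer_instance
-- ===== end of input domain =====

-- B replaces A's per-character counter+max scan by a run-splitting scan (longest maximal ACGT run); alternative decomposition, same cost.


-- ===== PORT A =====
-- char == 'A' or char == 'C' or char == 'G' or char == 'T'
def pvValid (c : Char) : Bool := c == 'A' || c == 'C' || c == 'G' || c == 'T'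

-- the for-loop of A: state (new, longest), branch order as in A
def pvAGo : List Char → Int → Int → Int
  | [], _, longest => longest
  | c :: t, new, longest =>
      if pvValid c then pvAGo t (new + 1) (max longest (new + 1))
      else pvAGo t 0 longest

def longestDNASequence (sequence : String) : Int :=
  pvAGo sequence.toList 0 0

-- ===== PORT B =====
-- B's outer while-loop: if head is valid, measure the whole maximal run and drop it; else drop one char
def pvBGo : List Char → Int
  | [] => 0
  | c :: t =>
      if pvValid c then
        max (((c :: t).takeWhile pvValid).length : Int) (pvBGo (t.dropWhile pvValid))
      else pvBGo t
termination_by l => l.length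
decreasing_by
  · simpa using Nat.lt_succ_of_le (List.length_dropWhile_le pvValid t)
  · simp

def longestDNASequence_alt (sequence : String) : Int :=
  pvBGo sequence.toList

-- ===== PRECONDITION & SPEC =====
def Spec_longestDNASequence (sequence : String) (out : Int) : Prop := out = longestDNASequence_alt sequence
instance (sequence : String) (out : Int) : Decidable (Spec_longestDNASequence sequence out) := by unfold Spec_longestDNASequence; infer_instance

-- ===== CLAIM (what is proved, stated in full; the proofs are below) =====
def Claim_equal_longestDNASequence : Prop := ∀ (sequence : String), Dom_longestDNASequence sequence → Spec_longestDNASequence sequence (longestDNASequence sequence)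

-- ===== LEMMAS AND PROOFS =====

-- Inside a run: A's counter accumulates the whole valid prefix into `longest`.
theorem pvAGo_run (l : List Char) : ∀ (new longest : Int), 0 ≤ new → new ≤ longest →
    pvAGo l new longest
      = pvAGo (l.dropWhile pvValid) 0 (max longest (new + ((l.takeWhile pvValid).length : Int))) := by
  induction l with
  | nil =>
      intro new longest _ h2
      simp [pvAGo, max_eq_left h2]
  | cons c t ih =>
      intro new longest h1 h2
      by_cases hc : pvValid c
      · rw [show pvAGo (c :: t) new longest = pvAGo t (new + 1) (max longest (new + 1)) by
          simp [pvAGo, hc]]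
        rw [ih (new + 1) (max longest (new + 1)) (by omega) (le_max_right _ _)]
        simp only [List.takeWhile_cons_of_pos hc, List.dropWhile_cons_of_pos hc,
          List.length_cons]
        congr 1
        push_cast
        omega
      · simp only [List.takeWhile_cons_of_neg hc, List.dropWhile_cons_of_neg hc,
          List.length_nil, Nat.cast_zero, add_zero]
        rw [show pvAGo (c :: t) new longest = pvAGo t 0 longest by simp [pvAGo, hc]]
        rw [show pvAGo (c :: t) 0 (max longest new) = pvAGo t 0 (max longest new) by
          simp [pvAGo, hc]]
        rw [max_eq_left h2]

theorem pvBGo_nonneg (l : List Char) : 0 ≤ pvBGo l := by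
  induction l using pvBGo.induct with
  | case1 => simp [pvBGo]
  | case2 c t hc ih => rw [pvBGo]; simp [hc]; right; exact ih
  | case3 c t hc ih => rw [pvBGo]; simpa [hc] using ih

theorem pvAGo_eq_pvBGo (l : List Char) : ∀ longest : Int, 0 ≤ longest →
    pvAGo l 0 longest = max longest (pvBGo l) := by
  induction l using pvBGo.induct with
  | case1 =>
      intro longest h
      simp [pvAGo, pvBGo, max_eq_left h]
  | case2 c t hc ih =>
      intro longest h
      rw [pvAGo_run (c :: t) 0 longest le_rfl h]
      simp only [List.dropWhile_cons_of_pos hc, zero_add]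
      rw [ih _ (le_trans h (le_max_left _ _))]
      rw [pvBGo]
      simp only [hc, if_pos]
      rw [max_assoc]
  | case3 c t hc ih =>
      intro longest h
      rw [show pvAGo (c :: t) 0 longest = pvAGo t 0 longest by simp [pvAGo, hc]]
      rw [ih _ h, pvBGo]
      simp [hc]

-- ===== VERDICT (by name: the statement is the Claim_ definition above) =====
theorem longestDNASequence_spec : Claim_equal_longestDNASequence := by
  intro s _
  unfold Spec_longestDNASequence longestDNASequence longestDNASequence_alt
  rw [pvAGo_eq_pvBGo s.toList 0 le_rfl]
  exact max_eq_right (pvBGo_nonneg _)
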